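-- pv_equiv track=rewrite | github.com/lacortina/TB | SK_generator.py | params_from_kept_events
-- ===== SOURCE A (Python) =====
-- param_requires = {
--     'Vss': ('s','s'),
--     'Vsp': ('s','p'),
--     'Vsds': ('s','d'),
--     'Vpp_sigma': ('p','p'),
--     'Vpp_pi': ('p','p'),
--     'Vpds': ('p','d'),
--     'Vpdp': ('p','d'),
--     'Vdds': ('d','d'),
--     'Vddp': ('d','d'),
--     'Vddd': ('d','d'),
-- }
--
-- def orbital_types_from_list(orb_list):
--     tset = set()
--     for orb in orb_list:
--         if not orb: continue
--         c = orb[0].lower()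
--         if c in ('s','p','d'):
--             tset.add(c)
--     return tset
--
-- def params_from_kept_events(kept_events, orb_map):
--     species_pairs = set(ev['species'] for ev in kept_events)
--     species_flat = set()
--     for pair in species_pairs:
--         species_flat.update(pair)
--     orb_types = {s: orbital_types_from_list(orb_map.get(s, [])) for s in species_flat}
--     keep = set()
--     keep.update(['Delta','m','tol'])
--     # onsite
--     for s, tset in orb_types.items():
--         if 's' in tset: keep.add(f"E_s_{s}")
--         if 'p' in tset: keep.add(f"E_p_{s}")
--         if 'd' in tset: keep.add(f"E_d_{s}")
--     # V... por pareja
--     for (A,B) in species_pairs: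
--         pk = "_".join(sorted([A,B]))
--         types_A = orb_types.get(A, set())
--         types_B = orb_types.get(B, set())
--         for pname, (req1, req2) in param_requires.items():
--             ok = False
--             if (req1 in types_A and req2 in types_B) or (req2 in types_A and req1 in types_B):
--                 ok = True
--             if ok:
--                 keep.add(f"{pname}_{pk}")
--     return keep, species_pairs
-- ===== SOURCE B (Python) =====
-- param_requires = {
--     'Vss': ('s','s'),
--     'Vsp': ('s','p'),
--     'Vsds': ('s','d'),
--     'Vpp_sigma': ('p','p'),
--     'Vpp_pi': ('p','p'),
--     'Vpds': ('p','d'),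
--     'Vpdp': ('p','d'),
--     'Vdds': ('d','d'),
--     'Vddp': ('d','d'),
--     'Vddd': ('d','d'),
-- }
--
-- def params_from_kept_events(kept_events, orb_map):
--     # single pass over events: build the pair set and the flat species set together
--     species_pairs = set()
--     species_flat = set()
--     for ev in kept_events:
--         pair = ev['species']
--         species_pairs.add(pair)
--         species_flat.add(pair[0])
--         species_flat.add(pair[1])
--     keep = {'Delta', 'm', 'tol'}
--     # fused loop: compute each species' orbital types and emit its onsite params at once
--     orb_types = {}
--     for s in species_flat:
--         tset = set()
--         for orb in orb_map.get(s, []):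
--             if orb and orb[0].lower() in 'spd':
--                 tset.add(orb[0].lower())
--         orb_types[s] = tset
--         for t in 'spd':
--             if t in tset:
--                 keep.add("E_" + t + "_" + s)
--     # per pair: precompute the set of sorted type combos present, then 10 lookups
--     for pair in species_pairs:
--         pk = "_".join(sorted(pair))
--         tA = orb_types.get(pair[0], set())
--         tB = orb_types.get(pair[1], set())
--         combos = set()
--         for t1 in tA:
--             for t2 in tB:
--                 combos.add((t1, t2) if t1 <= t2 else (t2, t1))
--         for pname, req in param_requires.items():
--             key = req if req[0] <= req[1] else (req[1], req[0])
--             if key in combos: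
--                 keep.add(pname + "_" + pk)
--     return keep, species_pairs
-- ===== Notes on version B (the rewrite author's own statement) =====
-- stated objective: alternative
-- what changed: B builds the pair set and the flat species set in a single pass over the events, fuses the orbital-type computation with the onsite-parameter emission into one loop per species, and per species pair precomputes the set of sorted orbital-type combos present so each of the 10 parameters is decided by one set lookup instead of A's symmetric two-membership test.
import Mathlib
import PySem

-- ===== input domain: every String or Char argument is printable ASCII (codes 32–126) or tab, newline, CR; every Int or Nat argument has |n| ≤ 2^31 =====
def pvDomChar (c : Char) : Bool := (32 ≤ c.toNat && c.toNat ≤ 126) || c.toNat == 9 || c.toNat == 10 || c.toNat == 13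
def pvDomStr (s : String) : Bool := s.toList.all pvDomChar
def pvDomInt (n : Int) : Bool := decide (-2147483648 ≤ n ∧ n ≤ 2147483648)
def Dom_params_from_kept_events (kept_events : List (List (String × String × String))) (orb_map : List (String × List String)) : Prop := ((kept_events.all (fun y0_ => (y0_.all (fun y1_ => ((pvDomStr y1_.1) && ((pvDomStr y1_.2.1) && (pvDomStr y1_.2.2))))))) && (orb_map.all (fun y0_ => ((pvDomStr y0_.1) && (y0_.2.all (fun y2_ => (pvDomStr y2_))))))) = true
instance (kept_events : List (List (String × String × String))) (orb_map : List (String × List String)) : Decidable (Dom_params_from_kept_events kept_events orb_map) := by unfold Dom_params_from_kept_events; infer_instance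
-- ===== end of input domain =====

-- B fuses A's three scans into one pass over the events plus one pass per species, and per
-- species pair replaces A's symmetric two-membership test for each parameter by a lookup in a
-- precomputed set of sorted orbital-type combos (objective: alternative, no speed claim).

-- ===== PORT A =====
def pvParamRequires : List (String × String × String) :=
  [("Vss","s","s"),("Vsp","s","p"),("Vsds","s","d"),("Vpp_sigma","p","p"),("Vpp_pi","p","p"),
   ("Vpds","p","d"),("Vpdp","p","d"),("Vdds","d","d"),("Vddp","d","d"),("Vddd","d","d")]

-- orb[0] on a string known non-empty is ported as a match on orb.toList (exact: IndexError impossible there)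
def orbital_types_from_list (orb_list : List String) : List String :=
  orb_list.foldl (fun tset orb =>
    match orb.toList with
    | [] => tset
    | c0 :: _ =>
      let c := PySem.Str.lower (String.ofList [c0])
      if c == "s" || c == "p" || c == "d" then PySem.Set.add tset c else tset) []

def pvA_speciesPairs (kept_events : List (List (String × String × String))) : List (String × String) :=
  kept_events.foldl (fun acc ev =>
    match PySem.Dict.get? (⟨ev⟩ : PySem.Dict String (String × String)) "species" with
    | some p => PySem.Set.add acc p
    | none => acc) []   -- none = KeyError in Python, excluded by Pre_

def pvA_speciesFlat (sp : List (String × String)) : List String :=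
  sp.foldl (fun acc pr => PySem.Set.update acc [pr.1, pr.2]) []

def pvA_orbTypes (orb_map : List (String × List String)) (flat : List String) : PySem.Dict String (List String) :=
  flat.foldl (fun d s => d.insert s (orbital_types_from_list (PySem.Dict.getD ⟨orb_map⟩ s []))) PySem.Dict.empty

def pvA_onsite (ot : PySem.Dict String (List String)) (keep : List String) : List String :=
  ot.items.foldl (fun k st =>
    let k := if PySem.Set.contains st.2 "s" then PySem.Set.add k ("E_s_" ++ st.1) else k
    let k := if PySem.Set.contains st.2 "p" then PySem.Set.add k ("E_p_" ++ st.1) else k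
    if PySem.Set.contains st.2 "d" then PySem.Set.add k ("E_d_" ++ st.1) else k) keep

def pvA_vpair (ot : PySem.Dict String (List String)) (k : List String) (pr : String × String) : List String :=
  let pk := PySem.Str.join "_" (PySem.List.sorted [pr.1, pr.2] (fun x => x) false)
  let typesA := ot.getD pr.1 []
  let typesB := ot.getD pr.2 []
  pvParamRequires.foldl (fun k pq =>
    if (PySem.Set.contains typesA pq.2.1 && PySem.Set.contains typesB pq.2.2)
       || (PySem.Set.contains typesA pq.2.2 && PySem.Set.contains typesB pq.2.1)
    then PySem.Set.add k (pq.1 ++ "_" ++ pk) else k) k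

def params_from_kept_events (kept_events : List (List (String × String × String))) (orb_map : List (String × List String)) : List String × (List (String × String)) :=
  let sp := pvA_speciesPairs kept_events
  let flat := pvA_speciesFlat sp
  let ot := pvA_orbTypes orb_map flat
  let keep : List String := PySem.Set.update PySem.Set.empty ["Delta","m","tol"]
  let keep := pvA_onsite ot keep
  let keep := sp.foldl (pvA_vpair ot) keep
  (keep, sp)

-- ===== PORT B =====
def pvB_collect (kept_events : List (List (String × String × String))) : List (String × String) × List String :=
  kept_events.foldl (fun acc ev =>
    match PySem.Dict.get? (⟨ev⟩ : PySem.Dict String (String × String)) "species" with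
    | some pair => (PySem.Set.add acc.1 pair,
        PySem.Set.add (PySem.Set.add acc.2 pair.1) pair.2)
    | none => acc) ([], [])   -- none = KeyError in Python, excluded by Pre_

-- `orb[0].lower() in 'spd'` on a one-character string is exactly membership of that character in "spd"
def pvB_typesOf (orb_map : List (String × List String)) (s : String) : List String :=
  (PySem.Dict.getD ⟨orb_map⟩ s []).foldl (fun tset orb =>
    match orb.toList with
    | [] => tset
    | c0 :: _ =>
      if "spd".toList.contains (PySem.Chars.lowerChar c0)
      then PySem.Set.add tset (String.ofList [PySem.Chars.lowerChar c0]) else tset) []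

def pvB_onsiteStep (orb_map : List (String × List String)) (st : PySem.Dict String (List String) × List String) (s : String) : PySem.Dict String (List String) × List String :=
  let tset := pvB_typesOf orb_map s
  (st.1.insert s tset,
   ["s","p","d"].foldl (fun k t =>
     if PySem.Set.contains tset t then PySem.Set.add k ("E_" ++ t ++ "_" ++ s) else k) st.2)

def pvB_vpair (ot : PySem.Dict String (List String)) (k : List String) (pr : String × String) : List String :=
  let pk := PySem.Str.join "_" (PySem.List.sorted [pr.1, pr.2] (fun x => x) false)
  let tA := ot.getD pr.1 []
  let tB := ot.getD pr.2 []
  let combos : List (String × String) :=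
    tA.foldl (fun cs t1 =>
      tB.foldl (fun cs t2 =>
        PySem.Set.add cs (if t1 ≤ t2 then (t1, t2) else (t2, t1))) cs) []
  pvParamRequires.foldl (fun k pq =>
    if PySem.Set.contains combos (if pq.2.1 ≤ pq.2.2 then (pq.2.1, pq.2.2) else (pq.2.2, pq.2.1))
    then PySem.Set.add k (pq.1 ++ "_" ++ pk) else k) k

def params_from_kept_events_alt (kept_events : List (List (String × String × String))) (orb_map : List (String × List String)) : List String × (List (String × String)) :=
  let sf := pvB_collect kept_events
  let keep : List String := PySem.Set.ofList ["Delta","m","tol"]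
  let dk := sf.2.foldl (pvB_onsiteStep orb_map) (PySem.Dict.empty, keep)
  let keep := sf.1.foldl (pvB_vpair dk.1) dk.2
  (keep, sf.1)

-- ===== PRECONDITION & SPEC =====
-- Pre_ excludes exactly the inputs where some event lacks the key 'species' (Python A raises KeyError there)
def Pre_params_from_kept_events (kept_events : List (List (String × String × String))) (orb_map : List (String × List String)) : Prop :=
  kept_events.all (fun ev => ev.any (fun kv => kv.1 == "species")) = true
instance (kept_events : List (List (String × String × String))) (orb_map : List (String × List String)) : Decidable (Pre_params_from_kept_events kept_events orb_map) := by unfold Pre_params_from_kept_events; infer_instance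

def pvWitness_params_from_kept_events : (List (List (String × String × String))) × (List (String × List String)) :=
  ([[("species", ("A","B"))]], [("A", ["s","px"])])

def Spec_params_from_kept_events (kept_events : List (List (String × String × String))) (orb_map : List (String × List String)) (out : List String × (List (String × String))) : Prop := out = params_from_kept_events_alt kept_events orb_map
instance (kept_events : List (List (String × String × String))) (orb_map : List (String × List String)) (out : List String × (List (String × String))) : Decidable (Spec_params_from_kept_events kept_events orb_map out) := by unfold Spec_params_from_kept_events; infer_instance

-- ===== CLAIM (what is proved, stated in full; the proofs are below) =====
def Claim_equal_params_from_kept_events : Prop := ∀ (kept_events : List (List (String × String × String))) (orb_map : List (String × List String)), Dom_params_from_kept_events kept_events orb_map → Pre_params_from_kept_events kept_events orb_map → Spec_params_from_kept_events kept_events orb_map (params_from_kept_events kept_events orb_map)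

-- ===== LEMMAS AND PROOFS =====
def pvPairsOf (kept_events : List (List (String × String × String))) : List (String × String) :=
  kept_events.filterMap (fun ev => PySem.Dict.get? (⟨ev⟩ : PySem.Dict String (String × String)) "species")

def pvAddPair (acc : List String) (p : String × String) : List String :=
  PySem.Set.add (PySem.Set.add acc p.1) p.2

theorem pvA_speciesPairs_eq (l : List (List (String × String × String))) (acc : List (String × String)) :
    l.foldl (fun acc ev =>
      match PySem.Dict.get? (⟨ev⟩ : PySem.Dict String (String × String)) "species" with
      | some p => PySem.Set.add acc p
      | none => acc) acc = (pvPairsOf l).foldl PySem.Set.add acc := by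
  induction l generalizing acc with
  | nil => rfl
  | cons ev t ih =>
    simp only [List.foldl, pvPairsOf, List.filterMap_cons]
    cases PySem.Dict.get? (⟨ev⟩ : PySem.Dict String (String × String)) "species" with
    | none => exact ih acc
    | some p => simpa [pvPairsOf] using ih (PySem.Set.add acc p)

theorem pvB_collect_eq (l : List (List (String × String × String))) (a : List (String × String)) (b : List String) :
    l.foldl (fun acc ev =>
      match PySem.Dict.get? (⟨ev⟩ : PySem.Dict String (String × String)) "species" with
      | some pair => (PySem.Set.add acc.1 pair,
          PySem.Set.add (PySem.Set.add acc.2 pair.1) pair.2)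
      | none => acc) (a, b)
    = ((pvPairsOf l).foldl PySem.Set.add a, (pvPairsOf l).foldl pvAddPair b) := by
  induction l generalizing a b with
  | nil => rfl
  | cons ev t ih =>
    simp only [List.foldl, pvPairsOf, List.filterMap_cons]
    cases PySem.Dict.get? (⟨ev⟩ : PySem.Dict String (String × String)) "species" with
    | none => exact ih a b
    | some p => simpa [pvPairsOf, pvAddPair] using ih (PySem.Set.add a p) (PySem.Set.add (PySem.Set.add b p.1) p.2)

theorem pvMem_foldl_addPair (s : List (String × String)) (acc : List String) (q : String)
    (h : q ∈ acc) : q ∈ s.foldl pvAddPair acc := by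
  induction s generalizing acc with
  | nil => exact h
  | cons p t ih =>
    rw [List.foldl_cons]
    exact ih _ (by simp [pvAddPair, PySem.Set.mem_add, h])

theorem pvComp_mem_foldl_addPair (s : List (String × String)) (acc : List String) (p : String × String)
    (h : p ∈ s) : p.1 ∈ s.foldl pvAddPair acc ∧ p.2 ∈ s.foldl pvAddPair acc := by
  induction s generalizing acc with
  | nil => simp at h
  | cons r t ih =>
    rw [List.foldl_cons]
    rcases List.mem_cons.mp h with rfl | h
    · constructor <;>
      · apply pvMem_foldl_addPair
        simp [pvAddPair, PySem.Set.mem_add]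
    · exact ih _ h

theorem pvFoldl_addPair_dedup (l : List (String × String)) (acc : List String) :
    (l.foldl PySem.Set.add []).foldl pvAddPair acc = l.foldl pvAddPair acc := by
  induction l using List.reverseRecOn with
  | nil => rfl
  | append_singleton t x ih =>
    rw [List.foldl_append, List.foldl_append, List.foldl_cons, List.foldl_nil,
        List.foldl_cons, List.foldl_nil]
    by_cases hx : x ∈ t.foldl PySem.Set.add []
    · rw [PySem.Set.add_of_mem hx, ih]
      have hcomp := pvComp_mem_foldl_addPair (t.foldl PySem.Set.add []) acc x hx
      rw [← ih]
      simp only [pvAddPair, PySem.Set.add_of_mem hcomp.1, PySem.Set.add_of_mem hcomp.2]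
    · rw [PySem.Set.add_of_not_mem hx, List.foldl_append, List.foldl_cons, List.foldl_nil, ih]

theorem pvFlat_nodup (l : List (String × String)) (s : List String) (hs : s.Nodup) :
    (l.foldl pvAddPair s).Nodup := by
  induction l generalizing s with
  | nil => exact hs
  | cons p t ih =>
    rw [List.foldl_cons]
    exact ih _ (PySem.Set.nodup_add _ _ (PySem.Set.nodup_add _ _ hs))

theorem pvDictFold_items (f : String → List String) (l : List String) (d : PySem.Dict String (List String))
    (hfresh : ∀ s ∈ l, d.contains s = false) (hnd : l.Nodup) :
    (l.foldl (fun d s => d.insert s (f s)) d).items = d.items ++ l.map (fun s => (s, f s)) := by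
  induction l generalizing d with
  | nil => simp
  | cons s t ih =>
    rw [List.foldl_cons, List.map_cons]
    have hs : d.contains s = false := hfresh s (by simp)
    have h1 : (d.insert s (f s)).items = d.items ++ [(s, f s)] :=
      PySem.Dict.items_insert_of_not_contains _ _ hs
    have hfresh' : ∀ x ∈ t, (d.insert s (f s)).contains x = false := by
      intro x hx
      rw [PySem.Dict.contains_insert]
      have hxs : x ≠ s := by
        intro hh; subst hh; exact (List.nodup_cons.mp hnd).1 hx
      simp [hxs, hfresh x (by simp [hx])]
    rw [ih _ hfresh' (List.nodup_cons.mp hnd).2, h1]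
    simp

theorem pvTypes_eq (orb_map : List (String × List String)) (s : String) :
    orbital_types_from_list (PySem.Dict.getD (⟨orb_map⟩ : PySem.Dict String (List String)) s []) = pvB_typesOf orb_map s := by
  unfold orbital_types_from_list pvB_typesOf
  congr 1
  funext tset orb
  cases horb : orb.toList with
  | nil => rfl
  | cons c0 rest =>
    simp only []
    have hc : PySem.Str.lower (String.ofList [c0]) = String.ofList [PySem.Chars.lowerChar c0] := by
      simp [PySem.Str.lower, PySem.Chars.lower]
    rw [hc]
    have hcond : ((String.ofList [PySem.Chars.lowerChar c0] == "s" || String.ofList [PySem.Chars.lowerChar c0] == "p") || String.ofList [PySem.Chars.lowerChar c0] == "d")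
        = "spd".toList.contains (PySem.Chars.lowerChar c0) := by
      generalize PySem.Chars.lowerChar c0 = cl
      have hone : ∀ (a : Char), (String.ofList [cl] == String.ofList [a]) = (cl == a) := by
        intro a
        cases hca : (cl == a) with
        | true => simp at hca; simp [hca]
        | false =>
          simp at hca
          apply beq_eq_false_iff_ne.mpr
          intro hcontra
          exact hca (by simpa using congrArg String.toList hcontra)
      have hs : ("s" : String) = String.ofList ['s'] := rfl
      have hp : ("p" : String) = String.ofList ['p'] := rfl
      have hd : ("d" : String) = String.ofList ['d'] := rfl
      rw [hs, hp, hd, hone, hone, hone]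
      have hspd : "spd".toList = ['s','p','d'] := by decide
      rw [hspd]
      cases h1 : (cl == 's') <;> cases h2 : (cl == 'p') <;> cases h3 : (cl == 'd') <;> simp_all
    rw [hcond]

theorem pvB_fused_eq (orb_map : List (String × List String)) (l : List String)
    (d : PySem.Dict String (List String)) (k : List String) :
    l.foldl (pvB_onsiteStep orb_map) (d, k)
    = (l.foldl (fun d s => d.insert s (pvB_typesOf orb_map s)) d,
       l.foldl (fun k s =>
         ["s","p","d"].foldl (fun k t =>
           if PySem.Set.contains (pvB_typesOf orb_map s) t then PySem.Set.add k ("E_" ++ t ++ "_" ++ s) else k) k) k) := by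
  induction l generalizing d k with
  | nil => rfl
  | cons s t ih => exact ih _ _

theorem pvOnsite_step_eq (orb_map : List (String × List String)) (k : List String) (s : String) :
    (let tset := pvB_typesOf orb_map s
     let k := if PySem.Set.contains tset "s" then PySem.Set.add k ("E_s_" ++ s) else k
     let k := if PySem.Set.contains tset "p" then PySem.Set.add k ("E_p_" ++ s) else k
     if PySem.Set.contains tset "d" then PySem.Set.add k ("E_d_" ++ s) else k)
    = ["s","p","d"].foldl (fun k t =>
        if PySem.Set.contains (pvB_typesOf orb_map s) t then PySem.Set.add k ("E_" ++ t ++ "_" ++ s) else k) k := by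
  simp only [List.foldl]
  rw [show ("E_" ++ "s" ++ "_" : String) = "E_s_" from rfl,
      show ("E_" ++ "p" ++ "_" : String) = "E_p_" from rfl,
      show ("E_" ++ "d" ++ "_" : String) = "E_d_" from rfl]

def pvNorm (a b : String) : String × String := if a ≤ b then (a, b) else (b, a)

theorem pvNorm_symm (a b : String) : pvNorm a b = pvNorm b a := by
  unfold pvNorm
  rcases le_total a b with h | h
  · by_cases h2 : b ≤ a
    · have : a = b := le_antisymm h h2
      subst this; simp
    · simp [h, h2]
  · by_cases h2 : a ≤ b
    · have : a = b := le_antisymm h2 h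
      subst this; simp
    · simp [h, h2]

theorem pvMem_combos (tA tB : List String) (cs : List (String × String)) (p : String × String) :
    p ∈ tA.foldl (fun cs t1 =>
      tB.foldl (fun cs t2 => PySem.Set.add cs (pvNorm t1 t2)) cs) cs
    ↔ p ∈ cs ∨ ∃ t1 ∈ tA, ∃ t2 ∈ tB, p = pvNorm t1 t2 := by
  induction tA generalizing cs with
  | nil => simp
  | cons t1 rest ih =>
    rw [List.foldl_cons, ih]
    rw [PySem.Set.mem_foldl_add]
    constructor
    · rintro (⟨h | h⟩ | h)
      · exact Or.inl h
      · rcases h with ⟨b, hb, rfl⟩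
        exact Or.inr ⟨t1, by simp, b, hb, rfl⟩
      · rcases h with ⟨u, hu, v, hv, rfl⟩
        exact Or.inr ⟨u, by simp [hu], v, hv, rfl⟩
    · rintro (h | ⟨u, hu, v, hv, rfl⟩)
      · exact Or.inl (Or.inl h)
      · rcases List.mem_cons.mp hu with rfl | hu
        · exact Or.inl (Or.inr ⟨v, hv, rfl⟩)
        · exact Or.inr ⟨u, hu, v, hv, rfl⟩

theorem pvNorm_eq_iff (a b c d : String) :
    pvNorm a b = pvNorm c d ↔ (a = c ∧ b = d) ∨ (a = d ∧ b = c) := by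
  constructor
  · intro h
    unfold pvNorm at h
    split_ifs at h with h1 h2 h2 <;>
      · rw [Prod.mk.injEq] at h
        first
          | exact Or.inl ⟨h.1, h.2⟩
          | exact Or.inr ⟨h.1, h.2⟩
          | exact Or.inr ⟨h.2, h.1⟩
          | exact Or.inl ⟨h.2, h.1⟩
  · rintro (⟨rfl, rfl⟩ | ⟨rfl, rfl⟩)
    · rfl
    · exact pvNorm_symm a b

theorem pvCond_eq (tA tB : List String) (r1 r2 : String) :
    ((PySem.Set.contains tA r1 && PySem.Set.contains tB r2) || (PySem.Set.contains tA r2 && PySem.Set.contains tB r1))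
    = PySem.Set.contains (tA.foldl (fun cs t1 =>
        tB.foldl (fun cs t2 => PySem.Set.add cs (pvNorm t1 t2)) cs) []) (pvNorm r1 r2) := by
  rw [Bool.eq_iff_iff]
  simp only [Bool.or_eq_true, Bool.and_eq_true, PySem.Set.contains_iff]
  rw [pvMem_combos]
  constructor
  · rintro (⟨h1, h2⟩ | ⟨h1, h2⟩)
    · exact Or.inr ⟨r1, h1, r2, h2, rfl⟩
    · exact Or.inr ⟨r2, h1, r1, h2, pvNorm_symm r1 r2⟩
  · rintro (h | ⟨u, hu, v, hv, h⟩)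
    · simp at h
    · rcases (pvNorm_eq_iff r1 r2 u v).mp h with ⟨rfl, rfl⟩ | ⟨rfl, rfl⟩
      · exact Or.inl ⟨hu, hv⟩
      · exact Or.inr ⟨hu, hv⟩

theorem pvVpair_eq (ot : PySem.Dict String (List String)) (k : List String) (pr : String × String) :
    pvA_vpair ot k pr = pvB_vpair ot k pr := by
  unfold pvA_vpair pvB_vpair
  simp only []
  generalize (PySem.Str.join "_" (PySem.List.sorted [pr.1, pr.2] (fun x => x) false)) = pk
  generalize (PySem.Dict.getD ot pr.1 []) = tA
  generalize (PySem.Dict.getD ot pr.2 []) = tB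
  have step : ∀ (l : List (String × String × String)) (k : List String),
      l.foldl (fun k pq =>
        if (PySem.Set.contains tA pq.2.1 && PySem.Set.contains tB pq.2.2)
           || (PySem.Set.contains tA pq.2.2 && PySem.Set.contains tB pq.2.1)
        then PySem.Set.add k (pq.1 ++ "_" ++ pk) else k) k
      = l.foldl (fun k pq =>
        if PySem.Set.contains (tA.foldl (fun cs t1 =>
            tB.foldl (fun cs t2 => PySem.Set.add cs (if t1 ≤ t2 then (t1, t2) else (t2, t1))) cs) [])
            (if pq.2.1 ≤ pq.2.2 then (pq.2.1, pq.2.2) else (pq.2.2, pq.2.1))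
        then PySem.Set.add k (pq.1 ++ "_" ++ pk) else k) k := by
    intro l
    induction l with
    | nil => intro k; rfl
    | cons pq rest ih =>
      intro k
      rw [List.foldl_cons, List.foldl_cons]
      have hc := pvCond_eq tA tB pq.2.1 pq.2.2
      simp only [pvNorm] at hc
      rw [hc]
      exact ih _
  exact step pvParamRequires k

set_option maxHeartbeats 1000000 in
-- ===== VERDICT (by name: the statement is the Claim_ definition above) =====
theorem params_from_kept_events_spec : Claim_equal_params_from_kept_events := by
  intro ke om _hdom _hpre
  unfold Spec_params_from_kept_events
  have hA : pvA_speciesPairs ke = (pvPairsOf ke).foldl PySem.Set.add [] := pvA_speciesPairs_eq ke []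
  have hB : pvB_collect ke = ((pvPairsOf ke).foldl PySem.Set.add [], (pvPairsOf ke).foldl pvAddPair []) := pvB_collect_eq ke [] []
  have hflat : pvA_speciesFlat (pvA_speciesPairs ke) = (pvPairsOf ke).foldl pvAddPair [] := by
    rw [hA]
    have hupd : pvA_speciesFlat ((pvPairsOf ke).foldl PySem.Set.add [])
        = ((pvPairsOf ke).foldl PySem.Set.add []).foldl pvAddPair [] := rfl
    rw [hupd]
    exact pvFoldl_addPair_dedup _ _
  have hnd : ((pvPairsOf ke).foldl pvAddPair ([] : List String)).Nodup := pvFlat_nodup _ _ (by simp)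
  -- name the fused fold of B
  have hfuse := pvB_fused_eq om ((pvPairsOf ke).foldl pvAddPair []) PySem.Dict.empty (PySem.Set.ofList ["Delta","m","tol"])
  have hdicts : pvA_orbTypes om ((pvPairsOf ke).foldl pvAddPair [])
      = ((pvPairsOf ke).foldl pvAddPair []).foldl (fun d s => d.insert s (pvB_typesOf om s)) PySem.Dict.empty := by
    unfold pvA_orbTypes
    congr 1
    funext d s
    rw [pvTypes_eq]
  have hdict2 : pvA_orbTypes om ((pvPairsOf ke).foldl pvAddPair [])
      = (((pvPairsOf ke).foldl pvAddPair []).foldl (pvB_onsiteStep om) (PySem.Dict.empty, PySem.Set.ofList ["Delta","m","tol"])).1 := by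
    rw [hfuse]; exact hdicts
  have honsite : pvA_onsite (pvA_orbTypes om ((pvPairsOf ke).foldl pvAddPair []))
        (PySem.Set.update PySem.Set.empty ["Delta","m","tol"])
      = (((pvPairsOf ke).foldl pvAddPair []).foldl (pvB_onsiteStep om) (PySem.Dict.empty, PySem.Set.ofList ["Delta","m","tol"])).2 := by
    rw [hfuse]
    unfold pvA_onsite
    rw [hdicts, pvDictFold_items (fun s => pvB_typesOf om s) _ _ (fun s _ => by simp [PySem.Dict.empty]) hnd]
    have hempty : (PySem.Dict.empty : PySem.Dict String (List String)).items = [] := rfl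
    rw [hempty, List.nil_append, List.foldl_map]
    have hstart : (PySem.Set.update PySem.Set.empty ["Delta","m","tol"] : List String) = PySem.Set.ofList ["Delta","m","tol"] := rfl
    rw [hstart]
    have hstep : (fun (k : List String) (s : String) =>
          (fun (k : List String) (st : String × List String) =>
            let k := if PySem.Set.contains st.2 "s" then PySem.Set.add k ("E_s_" ++ st.1) else k
            let k := if PySem.Set.contains st.2 "p" then PySem.Set.add k ("E_p_" ++ st.1) else k
            if PySem.Set.contains st.2 "d" then PySem.Set.add k ("E_d_" ++ st.1) else k) k (s, pvB_typesOf om s))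
        = (fun (k : List String) (s : String) =>
            ["s","p","d"].foldl (fun k t =>
              if PySem.Set.contains (pvB_typesOf om s) t then PySem.Set.add k ("E_" ++ t ++ "_" ++ s) else k) k) := by
      funext k s
      exact pvOnsite_step_eq om k s
    rw [hstep]
  have hv : pvA_vpair (pvA_orbTypes om ((pvPairsOf ke).foldl pvAddPair []))
      = pvB_vpair ((((pvPairsOf ke).foldl pvAddPair []).foldl (pvB_onsiteStep om) (PySem.Dict.empty, PySem.Set.ofList ["Delta","m","tol"])).1) := by
    funext k pr
    rw [pvVpair_eq, hdict2]
  have lhs : params_from_kept_events ke om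
      = ((pvA_speciesPairs ke).foldl (pvA_vpair (pvA_orbTypes om (pvA_speciesFlat (pvA_speciesPairs ke))))
          (pvA_onsite (pvA_orbTypes om (pvA_speciesFlat (pvA_speciesPairs ke))) (PySem.Set.update PySem.Set.empty ["Delta","m","tol"])),
         pvA_speciesPairs ke) := rfl
  have rhs : params_from_kept_events_alt ke om
      = ((pvB_collect ke).1.foldl
          (pvB_vpair (((pvB_collect ke).2.foldl (pvB_onsiteStep om) (PySem.Dict.empty, PySem.Set.ofList ["Delta","m","tol"])).1))
          (((pvB_collect ke).2.foldl (pvB_onsiteStep om) (PySem.Dict.empty, PySem.Set.ofList ["Delta","m","tol"])).2),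
         (pvB_collect ke).1) := rfl
  rw [lhs, rhs, hB, hflat, hA]
  simp only []
  rw [honsite, hA] at *
  rw [hv]
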